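-- pv_equiv track=rewrite | github.com/rrrealman/fizz_buzz | max_substrs.py | count_max_substr
-- ===== SOURCE A (Python) =====
-- def count_max_substr(string):
--
--     '''
--         This routine returns the longest sequences
--         of character founded in string
--     '''
--
--     res = {}
--
--     if len(string) == 0:
--         return res
--
--     def update_res(res, char, counter):
--         if char not in res:
--             res[char] = counter
--         elif res[char] < counter:
--             res[char] = counter
--
--     char_counter = 1
--     prev_char = string[0]
--     for char in string[1:]:
--         if char != prev_char:
--             update_res(res, prev_char, char_counter)
--             char_counter = 1
--         else:
--             char_counter += 1
--         prev_char = char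
--     update_res(res, prev_char, char_counter)
--     return res
-- ===== SOURCE B (Python) =====
-- def count_max_substr(string):
--     pos = {}
--     for i, ch in enumerate(string):
--         pos.setdefault(ch, []).append(i)
--     res = {}
--     for ch, idxs in pos.items():
--         groups = {}
--         for rank, j in enumerate(idxs):
--             groups[j - rank] = groups.get(j - rank, 0) + 1
--         res[ch] = max(groups.values())
--     return res
-- ===== Notes on version B (the rewrite author's own statement) =====
-- stated objective: alternative
-- what changed: B first builds an index of each character's positions in one pass, then per character counts occurrences of (position - rank), whose group sizes are exactly that character's run lengths, and stores the max count - no run scanning, prev-char state or run-length counter at all.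
import Mathlib
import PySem

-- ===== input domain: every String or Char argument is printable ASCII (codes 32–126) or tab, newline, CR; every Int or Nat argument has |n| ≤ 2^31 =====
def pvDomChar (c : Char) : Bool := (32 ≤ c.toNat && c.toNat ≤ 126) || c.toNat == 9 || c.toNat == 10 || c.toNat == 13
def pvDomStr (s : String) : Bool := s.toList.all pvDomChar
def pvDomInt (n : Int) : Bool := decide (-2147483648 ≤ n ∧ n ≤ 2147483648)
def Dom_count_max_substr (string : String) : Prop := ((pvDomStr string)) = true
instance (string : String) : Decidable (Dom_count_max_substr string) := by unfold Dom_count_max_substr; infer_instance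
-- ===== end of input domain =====

-- B replaces A's prev-char/counter run scan by a positions index per character plus
-- counting of (position − rank) groups, whose sizes are exactly the run lengths (alternative algorithm, same cost).

-- ===== PORT A =====
-- helper update_res of A
def pvUpdateResA (res : PySem.Dict String Int) (char : String) (counter : Int) : PySem.Dict String Int :=
  match PySem.Dict.get? res char with
  | none => PySem.Dict.insert res char counter
  | some v => if v < counter then PySem.Dict.insert res char counter else res

-- A's loop body: state = (res, char_counter, prev_char)
def pvStepA (s : PySem.Dict String Int × Int × Char) (char : Char) : PySem.Dict String Int × Int × Char :=
  if char ≠ s.2.2 then (pvUpdateResA s.1 (String.ofList [s.2.2]) s.2.1, 1, char)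
  else (s.1, s.2.1 + 1, char)

def count_max_substr (string : String) : List (String × Int) :=
  if string.toList.length = 0 then (PySem.Dict.empty : PySem.Dict String Int).items
  else
    let st := (string.toList.drop 1).foldl pvStepA (PySem.Dict.empty, 1, string.toList.headI)
    (pvUpdateResA st.1 (String.ofList [st.2.2]) st.2.1).items

-- ===== PORT B =====
-- a Python 1-character string (dict key) from a char
def pvKey (c : Char) : String := String.ofList [c]

-- inner loop of B's second pass: groups[j - rank] = groups.get(j - rank, 0) + 1; then max(groups.values())
-- (max's .getD 0 default is never used on reachable inputs: idxs is a nonempty position list there)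
def pvMaxRunB (idxs : List Int) : Int :=
  let groups := (PySem.List.enumerate idxs).foldl
      (fun g p => PySem.Dict.modify g (p.2 - p.1) 0 (· + 1)) (PySem.Dict.empty : PySem.Dict Int Int)
  (PySem.List.max? (PySem.Dict.values groups) (fun x => x)).getD 0

def count_max_substr_alt (string : String) : List (String × Int) :=
  -- pass 1: pos.setdefault(ch, []).append(i)  (in-place append = Dict.modify with list append)
  let pos := (PySem.List.enumerate string.toList).foldl
      (fun d p => PySem.Dict.modify d (pvKey p.2) [] (· ++ [p.1]))
      (PySem.Dict.empty : PySem.Dict String (List Int))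
  -- pass 2: res[ch] = max(groups.values())
  let res := (PySem.Dict.items pos).foldl
      (fun r q => PySem.Dict.insert r q.1 (pvMaxRunB q.2))
      (PySem.Dict.empty : PySem.Dict String Int)
  PySem.Dict.items res

-- ===== PRECONDITION & SPEC =====
def Spec_count_max_substr (string : String) (out : List (String × Int)) : Prop := out = count_max_substr_alt string
instance (string : String) (out : List (String × Int)) : Decidable (Spec_count_max_substr string out) := by unfold Spec_count_max_substr; infer_instance

-- ===== CLAIM (what is proved, stated in full; the proofs are below) =====
def Claim_equal_count_max_substr : Prop := ∀ (string : String), Dom_count_max_substr string → Spec_count_max_substr string (count_max_substr string)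

-- ===== LEMMAS AND PROOFS =====

-- run decomposition machinery
def pvScanRun (c : Char) : List Char → Nat
  | [] => 0
  | x :: xs => if x = c then 1 + pvScanRun c xs else 0

-- A, rephrased per maximal run (bridged to the char-by-char fold below)
def pvGoA : List Char → PySem.Dict String Int → PySem.Dict String Int
  | [], res => res
  | c :: rest, res =>
      pvGoA (rest.drop (pvScanRun c rest)) (pvUpdateResA res (pvKey c) (1 + (pvScanRun c rest : Int)))
termination_by l _ => l.length
decreasing_by simp [List.length_drop]

-- the list of run lengths of character c in l, in order
def pvRunLens (c : Char) : List Char → List Int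
  | [] => []
  | x :: rest =>
      if x = c then (1 + (pvScanRun x rest : Int)) :: pvRunLens c (rest.drop (pvScanRun x rest))
      else pvRunLens c (rest.drop (pvScanRun x rest))
termination_by l => l.length
decreasing_by all_goals simp [List.length_drop]

-- the run head characters, in order
def pvRunChars : List Char → List Char
  | [] => []
  | x :: rest => x :: pvRunChars (rest.drop (pvScanRun x rest))
termination_by l => l.length
decreasing_by simp [List.length_drop]

-- A's whole remaining computation from mid-run state (res, cc, prev) over the rest of the string
def pvAfin (res : PySem.Dict String Int) (cc : Int) (prev : Char) (l : List Char) : PySem.Dict String Int :=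
  let st := l.foldl pvStepA (res, cc, prev)
  pvUpdateResA st.1 (String.ofList [st.2.2]) st.2.1

lemma pvAfin_eq_goA (l : List Char) : ∀ (res : PySem.Dict String Int) (cc : Int) (prev : Char),
    pvAfin res cc prev l =
      pvGoA (l.drop (pvScanRun prev l)) (pvUpdateResA res (pvKey prev) (cc + (pvScanRun prev l : Int))) := by
  induction l with
  | nil => intro res cc prev; simp [pvAfin, pvScanRun, pvGoA, pvKey]
  | cons x rest ih =>
    intro res cc prev
    by_cases hx : x = prev
    · subst hx
      have h1 : pvAfin res cc x (x :: rest) = pvAfin res (cc + 1) x rest := by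
        simp [pvAfin, List.foldl_cons, pvStepA]
      have hs : pvScanRun x (x :: rest) = 1 + pvScanRun x rest := by simp [pvScanRun]
      have hdrop : List.drop (1 + pvScanRun x rest) (x :: rest) = List.drop (pvScanRun x rest) rest := by
        rw [Nat.add_comm]; exact List.drop_succ_cons
      have harg : cc + 1 + (pvScanRun x rest : Int) = cc + ((1 + pvScanRun x rest : Nat) : Int) := by
        push_cast; ring
      rw [h1, ih, hs, hdrop, harg]
    · have h1 : pvAfin res cc prev (x :: rest) = pvAfin (pvUpdateResA res (pvKey prev) cc) 1 x rest := by
        simp [pvAfin, List.foldl_cons, pvStepA, hx, pvKey]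
      have h2 : pvScanRun prev (x :: rest) = 0 := by simp [pvScanRun, hx]
      rw [h1, ih, h2]
      simp [pvGoA]

-- A = pvGoA
lemma countA_eq_goA (s : String) :
    count_max_substr s = (pvGoA s.toList PySem.Dict.empty).items := by
  cases hl : s.toList with
  | nil => simp [count_max_substr, hl, pvGoA]
  | cons c rest =>
    have hb := pvAfin_eq_goA rest PySem.Dict.empty 1 c
    simp only [pvAfin] at hb
    simp only [count_max_substr, hl, List.length_cons, List.drop_one,
      List.tail_cons, List.headI, Nat.succ_ne_zero, if_false]
    rw [hb]
    simp [pvGoA]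

-- the scanned prefix is a run
lemma pvTake_scan (x : Char) (rest : List Char) :
    rest.take (pvScanRun x rest) = List.replicate (pvScanRun x rest) x := by
  induction rest with
  | nil => simp [pvScanRun]
  | cons y ys ih =>
    by_cases hy : y = x
    · subst hy
      simp [pvScanRun, Nat.add_comm 1 (pvScanRun y ys), List.replicate_succ, ih]
    · simp [pvScanRun, hy]

lemma pvSplit_scan (x : Char) (rest : List Char) :
    rest = List.replicate (pvScanRun x rest) x ++ rest.drop (pvScanRun x rest) := by
  conv_lhs => rw [← List.take_append_drop (pvScanRun x rest) rest]
  rw [pvTake_scan]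

-- what remains after a run does not start with the run's character
lemma pvDrop_scan_head (x : Char) (rest : List Char) :
    rest.drop (pvScanRun x rest) = [] ∨
      ∃ z t, rest.drop (pvScanRun x rest) = z :: t ∧ z ≠ x := by
  induction rest with
  | nil => left; simp
  | cons y ys ih =>
    by_cases hy : y = x
    · subst hy
      simpa [pvScanRun, Nat.add_comm 1 (pvScanRun y ys)] using ih
    · right; exact ⟨y, ys, by simp [pvScanRun, hy], hy⟩

lemma pvKey_inj {c c' : Char} (h : pvKey c = pvKey c') : c = c' := by
  have := congrArg String.toList h
  simpa [pvKey] using this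

-- ----- A-side characterisation -----

def pvMergeMax : Option Int → List Int → Option Int
  | o, [] => o
  | none, a :: t => pvMergeMax (some a) t
  | some w, a :: t => pvMergeMax (some (max w a)) t

lemma pvMergeMax_some (t : List Int) : ∀ w, pvMergeMax (some w) t = some (t.foldl max w) := by
  induction t with
  | nil => intro w; simp [pvMergeMax]
  | cons a t ih => intro w; simp [pvMergeMax, ih]

lemma pvUpdateResA_get?_self (d : PySem.Dict String Int) (k : String) (v : Int) :
    (pvUpdateResA d k v).get? k = some ((d.get? k).elim v (fun w => max w v)) := by
  unfold pvUpdateResA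
  cases h : d.get? k with
  | none => simp [PySem.Dict.get?_insert_self]
  | some w =>
    by_cases hw : w < v
    · simp [hw, PySem.Dict.get?_insert_self, max_eq_right (le_of_lt hw)]
    · simp [hw, h, max_eq_left (not_lt.mp hw)]

lemma pvUpdateResA_get?_ne (d : PySem.Dict String Int) (k j : String) (v : Int) (h : j ≠ k) :
    (pvUpdateResA d k v).get? j = d.get? j := by
  unfold pvUpdateResA
  cases hg : d.get? k with
  | none => simp [PySem.Dict.get?_insert_of_ne _ _ h]
  | some w =>
    by_cases hw : w < v
    · simp [hw, PySem.Dict.get?_insert_of_ne _ _ h]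
    · simp [hw]

lemma pvUpdateResA_keys (d : PySem.Dict String Int) (k : String) (v : Int) :
    (pvUpdateResA d k v).keys = PySem.Set.add d.keys k := by
  unfold pvUpdateResA PySem.Set.add
  cases hg : d.get? k with
  | none =>
    have hc : d.contains k = false := by
      rw [PySem.Dict.contains_eq_isSome_get?, hg]; rfl
    rw [PySem.Dict.keys_insert_of_not_contains _ _ hc]
    simp [← PySem.Dict.contains_iff_mem_keys, hc]
  | some w =>
    have hc : d.contains k = true := by
      rw [PySem.Dict.contains_eq_isSome_get?, hg]; rfl
    have hm : (PySem.Set.contains d.keys k : Bool) = true := by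
      simp [← PySem.Dict.contains_iff_mem_keys, hc]
    by_cases hw : w < v
    · simp only [hw, if_true, hm]
      rw [PySem.Dict.keys_insert_of_contains _ _ hc]
    · simp [hw, (PySem.Dict.contains_iff_mem_keys d k).mp hc]

lemma pvGoA_get? (c : Char) (l : List Char) : ∀ (d : PySem.Dict String Int),
    (pvGoA l d).get? (pvKey c) = pvMergeMax (d.get? (pvKey c)) (pvRunLens c l) := by
  induction l using pvRunChars.induct with
  | case1 => intro d; simp [pvGoA, pvRunLens, pvMergeMax]
  | case2 x rest ih =>
    intro d
    rw [pvGoA, ih]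
    by_cases hx : x = c
    · subst hx
      rw [pvUpdateResA_get?_self, pvRunLens]
      simp only [if_true]
      cases d.get? (pvKey x) <;> simp [pvMergeMax]
    · have hk : pvKey c ≠ pvKey x := fun h => hx (pvKey_inj h).symm
      rw [pvUpdateResA_get?_ne _ _ _ _ hk, pvRunLens]
      simp [hx]

lemma pvGoA_keys (l : List Char) : ∀ (d : PySem.Dict String Int),
    (pvGoA l d).keys = PySem.Set.update d.keys ((pvRunChars l).map pvKey) := by
  induction l using pvRunChars.induct with
  | case1 => intro d; simp [pvGoA, pvRunChars, PySem.Set.update]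
  | case2 x rest ih =>
    intro d
    rw [pvGoA, ih, pvUpdateResA_keys, pvRunChars]
    rw [List.map_cons, PySem.Set.update_cons]

lemma pvRunLens_ne_nil (c : Char) (l : List Char) (h : c ∈ l) : pvRunLens c l ≠ [] := by
  induction l using pvRunChars.induct with
  | case1 => simp at h
  | case2 x rest ih =>
    by_cases hx : x = c
    · subst hx; simp [pvRunLens]
    · rw [pvRunLens]
      simp only [hx, if_false]
      apply ih
      rcases List.mem_cons.mp h with h1 | h1
      · exact absurd h1.symm hx
      · conv at h1 => rw [pvSplit_scan x rest]
        rcases List.mem_append.mp h1 with h2 | h2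
        · exact absurd (List.eq_of_mem_replicate h2).symm hx
        · exact h2

-- PySem.Set helpers (facts about our fold shapes, not in the PySem API)
lemma pvSet_add_of_mem {α : Type} [BEq α] [LawfulBEq α] (s : PySem.Set α) (x : α) (h : x ∈ s) :
    PySem.Set.add s x = s := by
  rw [PySem.Set.add, if_pos ((PySem.Set.contains_iff s x).mpr h)]

lemma pvSet_update_replicate {α : Type} [BEq α] [LawfulBEq α] (s : PySem.Set α) (x : α) (k : Nat) (h : x ∈ s) :
    PySem.Set.update s (List.replicate k x) = s := by
  induction k with
  | zero => simp [PySem.Set.update]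
  | succ n ih =>
    rw [List.replicate_succ, PySem.Set.update_cons, pvSet_add_of_mem _ _ h, ih]

lemma pvSet_ofList_cons' {α : Type} [BEq α] [LawfulBEq α] (x : α) (M : List α) :
    PySem.Set.ofList (x :: M) = PySem.Set.update [x] M := by
  simp [PySem.Set.ofList, PySem.Set.update]

lemma pvSet_ofList_collapse {α : Type} [BEq α] [LawfulBEq α] (x : α) (k : Nat) (t : List α) :
    PySem.Set.ofList (x :: (List.replicate k x ++ t)) = PySem.Set.ofList (x :: t) := by
  rw [pvSet_ofList_cons', pvSet_ofList_cons', PySem.Set.update_append,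
    pvSet_update_replicate _ _ _ (by simp)]

lemma pvOfList_runChars (l : List Char) : PySem.Set.ofList (pvRunChars l) = PySem.Set.ofList l := by
  induction l using pvRunChars.induct with
  | case1 => simp [pvRunChars]
  | case2 x rest ih =>
    rw [pvRunChars, pvSet_ofList_cons', PySem.Set.update_eq_append_filter, ih,
      ← PySem.Set.update_eq_append_filter, ← pvSet_ofList_cons',
      ← pvSet_ofList_collapse x (pvScanRun x rest) (rest.drop (pvScanRun x rest)),
      ← pvSplit_scan x rest]

lemma pvOfList_map_key (l : List Char) :
    PySem.Set.ofList (l.map pvKey) = (PySem.Set.ofList l).map pvKey := by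
  have upd : ∀ (l : List Char) (s : PySem.Set Char),
      PySem.Set.update (s.map pvKey) (l.map pvKey) = (PySem.Set.update s l).map pvKey := by
    intro l
    induction l with
    | nil => intro s; simp [PySem.Set.update]
    | cons x xs ih =>
      intro s
      rw [List.map_cons, PySem.Set.update_cons, PySem.Set.update_cons]
      have hadd : PySem.Set.add (s.map pvKey) (pvKey x) = (PySem.Set.add s x).map pvKey := by
        by_cases hm : x ∈ s
        · rw [pvSet_add_of_mem _ _ hm, pvSet_add_of_mem _ _ (List.mem_map_of_mem hm)]
        · have hm' : pvKey x ∉ s.map pvKey := by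
            intro hc
            rcases List.mem_map.mp hc with ⟨y, hy, hk⟩
            exact hm (by rwa [pvKey_inj hk] at hy)
          have hc1 : ¬ PySem.Set.contains (s.map pvKey) (pvKey x) = true := by
            rw [PySem.Set.contains_iff]; exact hm'
          have hc2 : ¬ PySem.Set.contains s x = true := by
            rw [PySem.Set.contains_iff]; exact hm
          rw [PySem.Set.add, PySem.Set.add, if_neg hc1, if_neg hc2, List.map_append]
          rfl
      rw [hadd, ih]
  have h0 := upd l []
  simpa [PySem.Set.update_nil_left, PySem.Set.ofList] using h0

-- ----- B-side characterisation -----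

def pvIdxs (c : Char) (l : List Char) (o : Int) : List Int :=
  ((PySem.List.enumerate l o).filter (fun p => p.2 == c)).map (·.1)

def pvKs (c : Char) (l : List Char) (o r : Int) : List Int :=
  (PySem.List.enumerate (pvIdxs c l o) r).map (fun p => p.2 - p.1)

lemma pvKs_cons (c x : Char) (rest : List Char) (o r : Int) :
    pvKs c (x :: rest) o r =
      if x = c then (o - r) :: pvKs c rest (o + 1) (r + 1) else pvKs c rest (o + 1) r := by
  unfold pvKs pvIdxs
  rw [PySem.List.enumerate_cons]
  by_cases hx : x = c
  · subst hx
    simp [PySem.List.enumerate_cons]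
  · simp [hx]

lemma pvKs_replicate (c x : Char) (k : Nat) (t : List Char) (o r : Int) :
    pvKs c (List.replicate k x ++ t) o r =
      if x = c then List.replicate k (o - r) ++ pvKs c t (o + k) (r + k) else pvKs c t (o + k) r := by
  induction k generalizing o r with
  | zero => by_cases hx : x = c <;> simp [hx]
  | succ n ih =>
    rw [List.replicate_succ, List.cons_append, pvKs_cons]
    by_cases hx : x = c
    · subst hx
      rw [if_pos rfl, if_pos rfl, ih, if_pos rfl, List.replicate_succ, List.cons_append]
      have e1 : o + 1 - (r + 1) = o - r := by ring
      have e2 : o + 1 + (n : Int) = o + ((n + 1 : Nat) : Int) := by push_cast; ring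
      have e3 : r + 1 + (n : Int) = r + ((n + 1 : Nat) : Int) := by push_cast; ring
      rw [e1, e2, e3]
    · rw [if_neg hx, if_neg hx, ih, if_neg hx]
      have e2 : o + 1 + (n : Int) = o + ((n + 1 : Nat) : Int) := by push_cast; ring
      rw [e2]

lemma pvKs_lb (c : Char) (l : List Char) : ∀ (o r y : Int), y ∈ pvKs c l o r → o - r ≤ y := by
  induction l with
  | nil => intro o r y hy; simp [pvKs, pvIdxs, PySem.List.enumerate_nil] at hy
  | cons x rest ih =>
    intro o r y hy
    rw [pvKs_cons] at hy
    by_cases hx : x = c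
    · rw [if_pos hx] at hy
      rcases List.mem_cons.mp hy with h | h
      · omega
      · have := ih (o + 1) (r + 1) y h; omega
    · rw [if_neg hx] at hy
      have := ih (o + 1) r y hy; omega

lemma pvCounter_values_replicate (v : Int) (m : Nat) (t : List Int)
    (hm : 0 < m) (ht : ∀ y ∈ t, v < y) :
    (PySem.Dict.counter (List.replicate m v ++ t)).values = (m : Int) :: (PySem.Dict.counter t).values := by
  obtain ⟨n, rfl⟩ : ∃ n, m = n + 1 := ⟨m - 1, by omega⟩
  have hvt : v ∉ t := fun hv => lt_irrefl v (ht v hv)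
  have hof : PySem.Set.ofList (List.replicate (n + 1) v ++ t) = v :: PySem.Set.ofList t := by
    rw [List.replicate_succ, List.cons_append, pvSet_ofList_collapse, pvSet_ofList_cons',
      PySem.Set.update_eq_append_filter]
    have : (PySem.Set.ofList t).filter (fun y => !PySem.Set.contains [v] y) = PySem.Set.ofList t := by
      apply List.filter_eq_self.mpr
      intro y hy
      have hyt : y ∈ t := (PySem.Set.mem_ofList t y).mp hy
      have : y ≠ v := fun h => hvt (h ▸ hyt)
      simp [PySem.Set.contains, this]
    rw [this]
    rfl
  have hval : ∀ (xs : List Int), (PySem.Dict.counter xs).values = (PySem.Dict.counter xs).items.map (·.2) := by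
    intro xs; rfl
  rw [hval, hval, PySem.Dict.items_counter, PySem.Dict.items_counter, hof]
  rw [List.map_cons, List.map_cons, List.map_map, List.map_map]
  congr 1
  · simp [List.count_append, List.count_eq_zero.mpr hvt]
  · apply List.map_congr_left
    intro y hy
    have hyt : y ∈ t := (PySem.Set.mem_ofList t y).mp hy
    have hyv : y ≠ v := fun h => hvt (h ▸ hyt)
    simp [List.count_append, List.count_replicate, Ne.symm hyv]

lemma pvCounter_ks (c : Char) (l : List Char) : ∀ (o r : Int),
    (PySem.Dict.counter (pvKs c l o r)).values = pvRunLens c l := by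
  induction l using pvRunChars.induct with
  | case1 =>
    intro o r
    simp [pvKs, pvIdxs, PySem.List.enumerate_nil, pvRunLens, PySem.Dict.counter,
      PySem.Dict.values, PySem.Dict.empty]
  | case2 x rest ih =>
    intro o r
    rw [pvKs_cons, pvRunLens]
    by_cases hx : x = c
    · subst hx
      rw [if_pos rfl, if_pos rfl]
      have hsplit := pvSplit_scan x rest
      conv_lhs => rw [hsplit]
      rw [pvKs_replicate, if_pos rfl]
      have e1 : o + 1 - (r + 1) = o - r := by ring
      rw [e1, ← List.cons_append, ← List.replicate_succ]
      set K := pvScanRun x rest with hK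
      set tail := pvKs x (rest.drop K) (o + 1 + (K : Int)) (r + 1 + (K : Int)) with htail
      have hlt : ∀ y ∈ tail, o - r < y := by
        intro y hy
        rcases pvDrop_scan_head x rest with hnil | ⟨z, t, hzt, hz⟩
        · rw [htail, hnil] at hy
          simp [pvKs, pvIdxs, PySem.List.enumerate_nil] at hy
        · rw [htail, hzt, pvKs_cons, if_neg hz] at hy
          have := pvKs_lb x t (o + 1 + (K : Int) + 1) (r + 1 + (K : Int)) y hy
          omega
      rw [pvCounter_values_replicate (o - r) (K + 1) tail (by omega) hlt]
      rw [htail, ih]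
      congr 1
      push_cast; ring
    · rw [if_neg hx, if_neg hx]
      have hsplit := pvSplit_scan x rest
      conv_lhs => rw [hsplit]
      rw [pvKs_replicate, if_neg hx, ih]

lemma pvMaxRunB_eq (c : Char) (l : List Char) :
    pvMaxRunB (pvIdxs c l 0) = (PySem.List.max? (pvRunLens c l) (fun x => x)).getD 0 := by
  have hfold : (PySem.List.enumerate (pvIdxs c l 0)).foldl
      (fun g p => PySem.Dict.modify g (p.2 - p.1) 0 (· + 1)) (PySem.Dict.empty : PySem.Dict Int Int)
      = PySem.Dict.counter (pvKs c l 0 0) := by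
    rw [PySem.Dict.counter_eq_foldl]
    unfold pvKs
    rw [List.foldl_map]
  unfold pvMaxRunB
  simp only [hfold, pvCounter_ks]

-- ----- assembling both sides -----

lemma countA_items (s : String) :
    count_max_substr s =
      ((PySem.Set.ofList s.toList).map pvKey).map
        (fun k => (k, ((pvGoA s.toList PySem.Dict.empty).get? k).getD 0)) := by
  rw [countA_eq_goA]
  have hkeys : (pvGoA s.toList PySem.Dict.empty).keys
      = (PySem.Set.ofList s.toList).map pvKey := by
    rw [pvGoA_keys, PySem.Dict.keys_empty, PySem.Set.update_nil_left,
      pvOfList_map_key, pvOfList_runChars]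
  have hnd : (pvGoA s.toList PySem.Dict.empty).keys.Nodup := by
    rw [hkeys]
    exact (PySem.Set.nodup_ofList _).map (fun a b h => pvKey_inj h)
  rw [PySem.Dict.items_eq_map_keys _ hnd 0, hkeys]
  apply List.map_congr_left
  intro k _
  rw [PySem.Dict.getD_eq_get?_getD]

lemma countB_items (s : String) :
    count_max_substr_alt s =
      ((PySem.Set.ofList s.toList).map pvKey).map
        (fun k => (k, pvMaxRunB ((((PySem.List.enumerate s.toList).foldl
              (fun d p => PySem.Dict.modify d (pvKey p.2) [] (· ++ [p.1]))
              (PySem.Dict.empty : PySem.Dict String (List Int)))).getD k []))) := by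
  show ((((PySem.List.enumerate s.toList).foldl
      (fun d p => PySem.Dict.modify d (pvKey p.2) [] (· ++ [p.1]))
      (PySem.Dict.empty : PySem.Dict String (List Int))).items.foldl
      (fun r q => PySem.Dict.insert r q.1 (pvMaxRunB q.2))
      (PySem.Dict.empty : PySem.Dict String Int)).items) = _
  set pos := (PySem.List.enumerate s.toList).foldl
      (fun d p => PySem.Dict.modify d (pvKey p.2) [] (· ++ [p.1]))
      (PySem.Dict.empty : PySem.Dict String (List Int)) with hpos
  have hkeys : pos.keys = (PySem.Set.ofList s.toList).map pvKey := by
    rw [hpos, PySem.Dict.keys_foldl_modify_key (PySem.List.enumerate s.toList)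
        (fun p => pvKey p.2) [] (fun _ p v => v ++ [p.1]) PySem.Dict.empty,
      PySem.Dict.keys_empty, PySem.Set.update_nil_left]
    have hmap : (PySem.List.enumerate s.toList).map (fun p => pvKey p.2)
        = s.toList.map pvKey := by
      rw [show (fun (p : Int × Char) => pvKey p.2) = pvKey ∘ (fun (p : Int × Char) => p.2) from rfl,
        ← List.map_map, PySem.List.map_snd_enumerate]
    rw [hmap, pvOfList_map_key]
  have hnd : pos.keys.Nodup := by
    rw [hpos]
    exact PySem.Dict.nodup_keys_foldl_modify_key _ _ _ _ _ PySem.Dict.nodup_keys_empty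
  have hfresh := PySem.Dict.items_foldl_insert_fresh pos.items
      (fun (q : String × List Int) => q.1) (fun q => pvMaxRunB q.2)
      (PySem.Dict.empty : PySem.Dict String Int)
      (by intro a _; exact PySem.Dict.contains_empty _)
      (by simpa only [PySem.Dict.keys] using hnd)
  rw [hfresh]
  rw [PySem.Dict.items_eq_map_keys pos hnd [], hkeys]
  simp [List.map_map, Function.comp_def, PySem.Dict.empty]

-- the positions dict looks up to exactly the character's index list
lemma pvPos_getD (l : List Char) (c : Char) :
    ((PySem.List.enumerate l).foldl
        (fun d p => PySem.Dict.modify d (pvKey p.2) [] (· ++ [p.1]))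
        (PySem.Dict.empty : PySem.Dict String (List Int))).getD (pvKey c) []
      = pvIdxs c l 0 := by
  have h1 : ((PySem.List.enumerate l).map (fun p => (pvKey p.2, p.1))).foldl
      (fun d q => PySem.Dict.modify d q.1 [] (· ++ [q.2]))
      (PySem.Dict.empty : PySem.Dict String (List Int))
      = (PySem.List.enumerate l).foldl
        (fun d p => PySem.Dict.modify d (pvKey p.2) [] (· ++ [p.1]))
        (PySem.Dict.empty : PySem.Dict String (List Int)) := by
    rw [List.foldl_map]
  rw [← h1, PySem.Dict.getD_foldl_modify_append, PySem.Dict.getD_empty, List.nil_append]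
  rw [List.filter_map, List.map_map]
  have hcond : ∀ p : Int × Char,
      ((fun q : String × Int => q.1 == pvKey c) ∘ (fun p : Int × Char => (pvKey p.2, p.1))) p
        = (p.2 == c) := by
    intro p
    by_cases h : p.2 = c
    · simp [h]
    · have hne : pvKey p.2 ≠ pvKey c := fun hh => h (pvKey_inj hh)
      simp [h, hne]
  rw [List.filter_congr (fun p _ => hcond p)]
  rfl

-- ===== VERDICT (by name: the statement is the Claim_ definition above) =====
theorem count_max_substr_spec : Claim_equal_count_max_substr := by
  intro s _
  show count_max_substr s = count_max_substr_alt s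
  rw [countA_items, countB_items]
  apply List.map_congr_left
  intro k hk
  rcases List.mem_map.mp hk with ⟨c, hc, rfl⟩
  have hcl : c ∈ s.toList := (PySem.Set.mem_ofList _ _).mp hc
  congr 1
  rw [pvPos_getD, pvMaxRunB_eq, pvGoA_get?, PySem.Dict.get?_empty]
  obtain ⟨a, t, hat⟩ := List.exists_cons_of_ne_nil (pvRunLens_ne_nil c _ hcl)
  rw [hat]
  rw [show pvMergeMax none (a :: t) = pvMergeMax (some a) t from rfl,
    pvMergeMax_some, PySem.List.max?_id_cons]
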